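-- pv_equiv track=rewrite | github.com/jebreimo/Argen | clapgen/helptextparser.py | splitSingle
-- ===== SOURCE A (Python) =====
-- def findSingle(s, sub, start = 0):
--     """findSingle(s, sub[, start]) -> int
--
--        Returns the index of the first instance of sub in s which isn't
--        immediately followed by another instance of sub. The search starts at
--        start.
--     """
--     index = s.find(sub, start)
--     while index != -1:
--         nextStart = index + len(sub)
--         while s[nextStart:nextStart + len(sub)] == sub:
--             nextStart += len(sub)
--         if (nextStart == index + len(sub)):
--             return index
--         index = s.find(sub, nextStart)
--     return index
--
-- def splitSingle(s, separator, maxCount=-1):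
--     """
--     splitSingle(s, separator[, maxCount]) -> list of strings
--
--     Essentially performs the same operation as
--     s.split(separator, maxCount), but sequences of separators are
--     left alone (e.g. the C++ logical or-operator "||" is not considered a
--     separator when separator is "|").
--     """
--     result = []
--     start = 0
--     next = findSingle(s, separator)
--     while next != -1 and maxCount != 0:
--         result.append(s[start:next])
--         start = next + len(separator)
--         next = findSingle(s, separator, start)
--         maxCount -= 1
--     result.append(s[start:])
--     return result
-- ===== SOURCE B (Python) =====
-- def splitSingle(s, separator, maxCount=-1):
--     pieces = s.split(separator)
--     # Glue pieces back together across separator runs: an interior empty piece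
--     # marks two adjacent separators, which are therefore not split points.
--     groups = [pieces[0]]
--     glue = False
--     for i in range(1, len(pieces)):
--         p = pieces[i]
--         interior_empty = (p == "" and i + 1 < len(pieces))
--         if glue or interior_empty:
--             groups[-1] = groups[-1] + separator + p
--         else:
--             groups.append(p)
--         glue = interior_empty
--     # Cap the number of splits: keep maxCount groups, rejoin the rest verbatim.
--     if maxCount < 0 or maxCount >= len(groups) - 1:
--         return groups
--     return groups[:maxCount] + [separator.join(groups[maxCount:])]
-- ===== Notes on version B (the rewrite author's own statement) =====
-- stated objective: alternative
-- what changed: A interleaves repeated find-based scanning (findSingle with an inner run-skipping loop) with slicing and the maxCount check; B makes one s.split(separator) pass, re-glues pieces across separator runs (an interior empty piece marks two adjacent separators), and then caps the group list with maxCount, rejoining the remainder.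
-- outside the precondition, e.g. on splitSingle('a|b', '', -1): A does not finish within the time limit, B raises ValueError
import Mathlib
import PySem

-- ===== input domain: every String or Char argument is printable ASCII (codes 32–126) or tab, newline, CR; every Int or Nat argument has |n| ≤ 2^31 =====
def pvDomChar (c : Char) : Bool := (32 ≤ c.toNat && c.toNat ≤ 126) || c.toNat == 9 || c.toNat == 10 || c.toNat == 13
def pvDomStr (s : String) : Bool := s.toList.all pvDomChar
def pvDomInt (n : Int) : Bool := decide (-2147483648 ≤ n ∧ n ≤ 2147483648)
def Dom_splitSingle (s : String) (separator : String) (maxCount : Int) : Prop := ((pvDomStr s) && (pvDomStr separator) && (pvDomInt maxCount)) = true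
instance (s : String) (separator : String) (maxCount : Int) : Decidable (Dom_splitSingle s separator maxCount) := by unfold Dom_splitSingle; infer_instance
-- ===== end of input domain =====

-- B replaces A's interleaved find/slice scan by one str.split pass whose pieces are
-- re-glued across separator runs and then capped (objective: alternative decomposition).

-- ===== PORT A =====
-- inner `while s[nextStart:nextStart+len(sub)] == sub: nextStart += len(sub)` (fuel-guarded)
def runGo (t sub : List Char) : Nat → Int → Int
  | 0, ns => ns
  | fuel + 1, ns =>
    if PySem.Chars.slice t (some ns) (some (ns + (sub.length : Int))) = sub then
      runGo t sub fuel (ns + (sub.length : Int))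
    else ns

-- outer `while index != -1: …` of findSingle (fuel-guarded)
def fsGo (t sub : List Char) : Nat → Int → Int
  | 0, index => index
  | fuel + 1, index =>
    if index = -1 then index
    else
      let nextStart := runGo t sub (t.length + 1) (index + (sub.length : Int))
      if nextStart = index + (sub.length : Int) then index
      else fsGo t sub fuel (PySem.Chars.findFrom t sub nextStart none)

-- findSingle(s, sub, start=0)
def csFindSingle (t sub : List Char) (start : Int) : Int :=
  fsGo t sub (t.length + 1) (PySem.Chars.findFrom t sub start none)

-- `while next != -1 and maxCount != 0: …` of splitSingle (fuel-guarded)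
def splitGoA (t sep : List Char) : Nat → List (List Char) → Int → Int → Int → List (List Char)
  | 0, result, start, _, _ => result ++ [PySem.Chars.slice t (some start) none]
  | fuel + 1, result, start, next, maxCount =>
    if next ≠ -1 ∧ maxCount ≠ 0 then
      splitGoA t sep fuel (result ++ [PySem.Chars.slice t (some start) (some next)])
        (next + (sep.length : Int)) (csFindSingle t sep (next + (sep.length : Int))) (maxCount - 1)
    else result ++ [PySem.Chars.slice t (some start) none]

def csSplitSingle (t sep : List Char) (maxCount : Int) : List (List Char) :=
  splitGoA t sep (t.length + 2) [] 0 (csFindSingle t sep 0) maxCount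

def splitSingle (s : String) (separator : String) (maxCount : Int) : List String :=
  List.map String.ofList (csSplitSingle s.toList separator.toList maxCount)

-- ===== PORT B =====
-- groups[-1] = groups[-1] + x
def csAppendLast (gs : List (List Char)) (x : List Char) : List (List Char) :=
  gs.dropLast ++ [gs.getLastD [] ++ x]

-- one iteration of `for i in range(1, len(pieces)): …` with state (groups, glue)
def bStep (sep : List Char) (pieces : List (List Char))
    (st : List (List Char) × Bool) (i : Int) : List (List Char) × Bool :=
  let p := PySem.List.pyGetD pieces i []
  let ie : Bool := decide (p = [] ∧ i + 1 < (pieces.length : Int))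
  (if st.2 || ie then csAppendLast st.1 (sep ++ p) else st.1 ++ [p], ie)

def csSplitSingleAlt (t sep : List Char) (maxCount : Int) : List (List Char) :=
  match PySem.Chars.split? t sep with
  | none => []        -- separator == "": Python raises ValueError (outside Pre_)
  | some pieces =>
    match pieces with
    | [] => []        -- unreachable: str.split never returns an empty list
    | p0 :: _ =>
      let groups :=
        (List.foldl (bStep sep pieces) ([p0], false)
          (PySem.List.pyRange 1 (pieces.length : Int))).1
      if maxCount < 0 ∨ maxCount ≥ (groups.length : Int) - 1 then groups
      else
        PySem.List.slice groups none (some maxCount) ++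
          [PySem.Chars.join sep (PySem.List.slice groups (some maxCount) none)]

def splitSingle_alt (s : String) (separator : String) (maxCount : Int) : List String :=
  List.map String.ofList (csSplitSingleAlt s.toList separator.toList maxCount)

-- ===== PRECONDITION & SPEC =====
-- Pre_ excludes only separator == "": there Python A loops forever (never returns) and
-- Python B raises ValueError from str.split.
def Pre_splitSingle (s : String) (separator : String) (maxCount : Int) : Prop :=
  separator ≠ ""
instance (s : String) (separator : String) (maxCount : Int) : Decidable (Pre_splitSingle s separator maxCount) := by unfold Pre_splitSingle; infer_instance

def pvWitness_splitSingle : String × String × Int := ("a|b||c", "|", -1)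

def Spec_splitSingle (s : String) (separator : String) (maxCount : Int) (out : List String) : Prop := out = splitSingle_alt s separator maxCount
instance (s : String) (separator : String) (maxCount : Int) (out : List String) : Decidable (Spec_splitSingle s separator maxCount out) := by unfold Spec_splitSingle; infer_instance

-- ===== CLAIM (what is proved, stated in full; the proofs are below) =====
def Claim_equal_splitSingle : Prop := ∀ (s : String) (separator : String) (maxCount : Int), Dom_splitSingle s separator maxCount → Pre_splitSingle s separator maxCount → Spec_splitSingle s separator maxCount (splitSingle s separator maxCount)

-- ===== LEMMAS AND PROOFS =====

-- ===== reference definitions used only by the proofs =====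

def sepTimes (sep : List Char) : Nat → List Char
  | 0 => []
  | n + 1 => sep ++ sepTimes sep n

def runLenR (sep t : List Char) : Nat :=
  if h : sep <+: t ∧ sep ≠ [] then sep.length + runLenR sep (t.drop sep.length) else 0
termination_by t.length
decreasing_by
  have h1 := h.1.length_le
  have h2 : 0 < sep.length := List.length_pos_iff.mpr h.2
  simp only [List.length_drop]; omega

def fsingleR (sep t : List Char) : Option Nat :=
  if h : sep <:+: t ∧ sep ≠ [] then
    let i := (PySem.Chars.find t sep).toNat
    let k := runLenR sep (t.drop (i + sep.length))
    if k = 0 then some i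
    else Option.map (fun j => i + sep.length + k + j) (fsingleR sep (t.drop (i + sep.length + k)))
  else none
termination_by t.length
decreasing_by
  have h1 := h.1.length_le
  have h2 : 0 < sep.length := List.length_pos_iff.mpr h.2
  simp only [List.length_drop]; omega

theorem fsingleR_some_facts (sep : List Char) : ∀ (t : List Char), ∀ (j : Nat), fsingleR sep t = some j →
    sep ≠ [] ∧ sep <+: t.drop j ∧ j + sep.length ≤ t.length := by
  intro t
  induction t using fsingleR.induct (sep := sep) with
  | case1 x hx i k hk0 =>
    intro j h
    have hi : i = (PySem.Chars.find x sep).toNat := rfl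
    have hk : k = runLenR sep (List.drop (i + sep.length) x) := rfl
    clear_value i k
    subst hk; subst hi
    rw [fsingleR, dif_pos hx] at h
    simp only [hk0, if_true, Option.some.injEq] at h
    subst h
    have hnn : 0 ≤ PySem.Chars.find x sep := (PySem.Chars.find_nonneg_iff x sep).mpr hx.1
    have hsp := (PySem.Chars.find_spec hnn).1
    refine ⟨hx.2, hsp, ?_⟩
    have h5 := hsp.length_le
    simp only [List.length_drop] at h5
    have hle := PySem.Chars.find_le_length x sep
    have hpos : 0 < sep.length := List.length_pos_iff.mpr hx.2
    omega
  | case2 x hx i k hkne IH =>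
    intro j h
    have hi : i = (PySem.Chars.find x sep).toNat := rfl
    have hk : k = runLenR sep (List.drop (i + sep.length) x) := rfl
    clear_value i k
    subst hk; subst hi
    rw [fsingleR, dif_pos hx] at h
    simp only [hkne, if_false, Option.map_eq_some_iff] at h
    obtain ⟨j', hj', rfl⟩ := h
    obtain ⟨h1, h2, h3⟩ := IH j' hj'
    rw [List.drop_drop] at h2
    rw [List.length_drop] at h3
    have hpos : 0 < sep.length := List.length_pos_iff.mpr h1
    exact ⟨h1, h2, by omega⟩
  | case3 x hx =>
    intro j h
    rw [fsingleR, dif_neg hx] at h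
    exact absurd h (by simp)

def gAR (sep t : List Char) (m : Int) : List (List Char) :=
  match hfs : fsingleR sep t with
  | none => [t]
  | some i => if m = 0 then [t] else t.take i :: gAR sep (t.drop (i + sep.length)) (m - 1)
termination_by t.length
decreasing_by
  have h := fsingleR_some_facts sep t i hfs
  have h2 : 0 < sep.length := List.length_pos_iff.mpr h.1
  have h3 := h.2.2
  simp only [List.length_drop]; omega

def spR (sep t : List Char) : List (List Char) :=
  if h : sep <:+: t ∧ sep ≠ [] then
    (t.take (PySem.Chars.find t sep).toNat) ::
      spR sep (t.drop ((PySem.Chars.find t sep).toNat + sep.length))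
  else [t]
termination_by t.length
decreasing_by
  have h1 := h.1.length_le
  have h2 : 0 < sep.length := List.length_pos_iff.mpr h.2
  simp only [List.length_drop]; omega

def go1R (sep : List Char) : List Char → Bool → List (List Char) → List (List Char)
  | cur, _, [] => [cur]
  | cur, glue, q :: rest2 =>
    let ie : Bool := decide (q = ([] : List Char) ∧ rest2 ≠ [])
    if glue || ie then go1R sep (cur ++ sep ++ q) ie rest2
    else cur :: go1R sep q ie rest2

def gQR (sep : List Char) (ps : List (List Char)) : List (List Char) :=
  match ps with
  | [] => []
  | [p] => [p]
  | p :: q :: rest2 =>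
    let es := ((q :: rest2).dropLast).takeWhile (fun e => decide (e = []))
    let rest' := (q :: rest2).drop es.length
    if es = [] then p :: gQR sep (q :: rest2)
    else (gQR sep rest').modifyHead (fun h => p ++ sep ++ PySem.Chars.join sep es ++ sep ++ h)
termination_by ps.length
decreasing_by
  · simp
  · have := (List.takeWhile_sublist (p := fun e : List Char => decide (e = [])) (l := (q :: rest2).dropLast)).length_le
    simp only [List.length_drop, List.length_cons]
    omega

theorem runLenR_zero (sep u : List Char) (h : ¬ sep <+: u) : runLenR sep u = 0 := by
  rw [runLenR, dif_neg]; tauto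

theorem runLenR_prefix (sep u : List Char) (hp : sep <+: u) (hne : sep ≠ []) :
    runLenR sep u = sep.length + runLenR sep (u.drop sep.length) := by
  rw [runLenR, dif_pos ⟨hp, hne⟩]

theorem runLenR_le (sep : List Char) : ∀ u, runLenR sep u ≤ u.length := by
  intro u
  induction u using runLenR.induct (sep := sep) with
  | case1 x hx IH =>
    rw [runLenR, dif_pos hx]
    have h1 := hx.1.length_le
    simp only [List.length_drop] at IH
    omega
  | case2 x hx => rw [runLenR, dif_neg hx]; omega

theorem slice_eq_iff (t sub : List Char) (a : Nat) :
    (PySem.Chars.slice t (some (a : Int)) (some ((a : Int) + (sub.length : Int))) = sub) ↔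
      sub <+: t.drop a := by
  have hc : ((a : Int) + (sub.length : Int)) = ((a + sub.length : Nat) : Int) := by push_cast; ring
  rw [PySem.Chars.slice_eq_listSlice, hc, PySem.List.slice_natCast]
  have h2 : a + sub.length - a = sub.length := by omega
  rw [h2]
  rw [List.prefix_iff_eq_take]
  constructor
  · intro h; exact h.symm
  · intro h; exact h.symm

theorem runGo_eq (t sep : List Char) (hsep : sep ≠ []) :
    ∀ (fuel : Nat) (ns : Nat), t.length < fuel + ns →
      runGo t sep fuel (ns : Int) = (ns : Int) + ((runLenR sep (t.drop ns) : Nat) : Int) := by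
  have hpos : 0 < sep.length := List.length_pos_iff.mpr hsep
  intro fuel
  induction fuel with
  | zero =>
    intro ns h
    have hd : t.drop ns = [] := List.drop_eq_nil_of_le (by omega)
    rw [runGo, hd, runLenR_zero sep [] (by simp [List.prefix_nil]; exact hsep)]
    simp
  | succ fuel IH =>
    intro ns h
    rw [runGo]
    by_cases hp : sep <+: t.drop ns
    · rw [if_pos ((slice_eq_iff t sep ns).mpr hp)]
      have hc : (ns : Int) + (sep.length : Int) = ((ns + sep.length : Nat) : Int) := by push_cast; ring
      rw [hc, IH (ns + sep.length) (by omega)]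
      rw [runLenR_prefix sep (t.drop ns) hp hsep, List.drop_drop]
      push_cast; ring
    · rw [if_neg (by rw [slice_eq_iff t sep ns]; exact hp)]
      rw [runLenR_zero sep _ hp]
      simp

theorem fsingleR_none (sep u : List Char) (h : ¬ sep <:+: u) : fsingleR sep u = none := by
  rw [fsingleR, dif_neg]; tauto

theorem fsGo_eq (t sep : List Char) (hsep : sep ≠ []) :
    ∀ (fuel : Nat) (st : Nat), st ≤ t.length → t.length < fuel + st →
      fsGo t sep fuel (PySem.Chars.findFrom t sep (st : Int) none) =
        (fsingleR sep (t.drop st)).elim (-1 : Int) (fun j => ((st + j : Nat) : Int)) := by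
  have hpos : 0 < sep.length := List.length_pos_iff.mpr hsep
  intro fuel
  induction fuel with
  | zero => intro st h1 h2; omega
  | succ fuel IH =>
    intro st hst hfuel
    rw [PySem.Chars.findFrom_natCast t sep st hst]
    by_cases hfind : PySem.Chars.find (t.drop st) sep = -1
    · rw [if_pos hfind, fsGo, if_pos rfl,
        fsingleR_none sep _ ((PySem.Chars.find_eq_neg_one_iff _ _).mp hfind)]
      simp
    · rw [if_neg hfind]
      have hr0 : 0 ≤ PySem.Chars.find (t.drop st) sep := by
        have := PySem.Chars.neg_one_le_find (t.drop st) sep; omega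
      set r := PySem.Chars.find (t.drop st) sep with hr
      have hrn : r = ((r.toNat : Nat) : Int) := by omega
      have hinf : sep <:+: t.drop st := (PySem.Chars.find_nonneg_iff _ _).mp hr0
      have hocc : r.toNat + sep.length ≤ (t.drop st).length := by
        have hsp := (PySem.Chars.find_spec hr0).1
        have := hsp.length_le
        simp only [List.length_drop] at this ⊢
        have hle := PySem.Chars.find_le_length (t.drop st) sep
        simp only [List.length_drop] at hle
        omega
      rw [fsGo]
      have hne : ¬ ((st : Int) + r = -1) := by omega
      rw [if_neg hne]
      -- the inner run scan
      have hcast1 : (st : Int) + r + (sep.length : Int) = ((st + r.toNat + sep.length : Nat) : Int) := by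
        omega
      set K := runLenR sep (t.drop (st + r.toNat + sep.length)) with hK
      have hrun : runGo t sep (t.length + 1) ((st : Int) + r + (sep.length : Int)) =
          ((st + r.toNat + sep.length : Nat) : Int) + (K : Int) := by
        rw [hcast1]
        exact runGo_eq t sep hsep (t.length + 1) (st + r.toNat + sep.length) (by omega)
      -- unfold fsingleR on the suffix
      have hfs : fsingleR sep (t.drop st) =
          (if K = 0 then some r.toNat
           else Option.map (fun j => r.toNat + sep.length + K + j)
             (fsingleR sep (t.drop (st + r.toNat + sep.length + K)))) := by
        rw [fsingleR, dif_pos ⟨hinf, hsep⟩]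
        have e1 : (PySem.Chars.find (t.drop st) sep).toNat = r.toNat := by rw [← hr]
        simp only [e1, List.drop_drop]
        have e2 : st + (r.toNat + sep.length) = st + r.toNat + sep.length := by omega
        have e3 : st + (r.toNat + sep.length + K) = st + r.toNat + sep.length + K := by omega
        rw [e2, e3]
      by_cases hK0 : K = 0
      · rw [hrun]
        have : ((st + r.toNat + sep.length : Nat) : Int) + (K : Int) =
            (st : Int) + r + (sep.length : Int) := by omega
        rw [if_pos this, hfs, if_pos hK0]
        simp only [Option.elim_some]
        omega
      · rw [hrun]
        have hneq : ¬ (((st + r.toNat + sep.length : Nat) : Int) + (K : Int) =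
            (st : Int) + r + (sep.length : Int)) := by omega
        rw [if_neg hneq]
        have hstep : ((st + r.toNat + sep.length : Nat) : Int) + (K : Int) =
            ((st + r.toNat + sep.length + K : Nat) : Int) := by push_cast; ring
        rw [hstep]
        set st' := st + r.toNat + sep.length + K with hst'
        have hstle : st' ≤ t.length := by
          have h1 := runLenR_le sep (t.drop (st + r.toNat + sep.length))
          rw [← hK] at h1
          simp only [List.length_drop] at h1 hocc
          omega
        rw [IH st' hstle (by omega), hfs, if_neg hK0]
        cases ho : fsingleR sep (t.drop st') with
        | none => simp
        | some j =>
          simp only [Option.map_some, Option.elim_some]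
          omega

theorem csFindSingle_eq (t sep : List Char) (hsep : sep ≠ []) (st : Nat) (hst : st ≤ t.length) :
    csFindSingle t sep (st : Int) =
      (fsingleR sep (t.drop st)).elim (-1 : Int) (fun j => ((st + j : Nat) : Int)) :=
  fsGo_eq t sep hsep (t.length + 1) st hst (by omega)

theorem gAR_none (sep t : List Char) (m : Int) (h : fsingleR sep t = none) : gAR sep t m = [t] := by
  rw [gAR]
  split <;> simp_all

theorem gAR_some (sep t : List Char) (m : Int) (i : Nat) (h : fsingleR sep t = some i) :
    gAR sep t m = if m = 0 then [t] else t.take i :: gAR sep (t.drop (i + sep.length)) (m - 1) := by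
  rw [gAR]
  split <;> simp_all

theorem splitGoA_eq (t sep : List Char) (hsep : sep ≠ []) :
    ∀ (fuel : Nat) (st : Nat) (acc : List (List Char)) (m : Int),
      st ≤ t.length → t.length < fuel + st →
      splitGoA t sep fuel acc (st : Int) (csFindSingle t sep (st : Int)) m =
        acc ++ gAR sep (t.drop st) m := by
  have hpos : 0 < sep.length := List.length_pos_iff.mpr hsep
  intro fuel
  induction fuel with
  | zero => intro st acc m h1 h2; omega
  | succ fuel IH =>
    intro st acc m hst hfuel
    rw [splitGoA, csFindSingle_eq t sep hsep st hst]
    cases hfs : fsingleR sep (t.drop st) with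
    | none =>
      simp only [Option.elim_none]
      rw [if_neg (by simp)]
      rw [gAR_none sep _ m hfs, PySem.Chars.slice_eq_listSlice,
        PySem.List.slice_from t (by omega : (0:Int) ≤ (st : Int))]
      simp
    | some j =>
      simp only [Option.elim_some]
      obtain ⟨-, hpre, hlen⟩ := fsingleR_some_facts sep (t.drop st) j hfs
      simp only [List.length_drop] at hlen
      have hlen' : st + j + sep.length ≤ t.length := by omega
      by_cases hm : m = 0
      · rw [if_neg (by simp [hm])]
        rw [gAR_some sep _ m j hfs, if_pos hm, PySem.Chars.slice_eq_listSlice,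
          PySem.List.slice_from t (by omega : (0:Int) ≤ (st : Int))]
        simp
      · rw [if_pos ⟨by omega, hm⟩]
        have hc1 : ((st + j : Nat) : Int) + (sep.length : Int) = ((st + j + sep.length : Nat) : Int) := by
          push_cast; ring
        rw [hc1, IH (st + j + sep.length) _ (m - 1) (by omega) (by omega)]
        rw [gAR_some sep _ m j hfs, if_neg hm]
        have hsl : PySem.Chars.slice t (some ((st : Nat) : Int)) (some ((st + j : Nat) : Int)) =
            (t.drop st).take j := by
          rw [PySem.Chars.slice_eq_listSlice, PySem.List.slice_natCast]
          congr 1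
          omega
        rw [hsl, List.drop_drop]
        have e1 : st + (j + sep.length) = st + j + sep.length := by omega
        rw [e1]
        simp

theorem csSplitSingle_eq (t sep : List Char) (hsep : sep ≠ []) (m : Int) :
    csSplitSingle t sep m = gAR sep t m := by
  have h0 : ((0 : Nat) : Int) = (0 : Int) := rfl
  have := splitGoA_eq t sep hsep (t.length + 2) 0 [] m (by omega) (by omega)
  rw [h0] at this
  rw [csSplitSingle, this]
  simp

theorem findGo_eq (sub : List Char) : ∀ (l : List Char) (k : Nat),
    PySem.Chars.find.go sub l k =
      if PySem.Chars.find l sub = -1 then -1 else (k : Int) + PySem.Chars.find l sub := by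
  intro l
  induction l with
  | nil =>
    intro k
    show (if sub.isEmpty = true then (k : Int) else -1) = _
    have : PySem.Chars.find [] sub = if sub.isEmpty = true then (0 : Int) else -1 := rfl
    rw [this]
    cases h : sub.isEmpty <;> simp
  | cons c t IH =>
    intro k
    show (if sub.isPrefixOf (c :: t) = true then (k : Int) else PySem.Chars.find.go sub t (k + 1)) = _
    have hf : PySem.Chars.find (c :: t) sub =
        if sub.isPrefixOf (c :: t) = true then (0 : Int) else PySem.Chars.find.go sub t 1 := rfl
    rw [hf]
    cases hp : sub.isPrefixOf (c :: t)
    · simp only [Bool.false_eq_true, if_false]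
      rw [IH (k + 1), IH 1]
      by_cases h1 : PySem.Chars.find t sub = -1
      · simp [h1]
      · have h0 : 0 ≤ PySem.Chars.find t sub := by
          have := PySem.Chars.neg_one_le_find t sub; omega
        rw [if_neg h1, if_neg h1, if_neg (by omega)]
        push_cast; ring
    · simp

theorem find_eq_zero_of_prefix (t sub : List Char) (h : sub <+: t) : PySem.Chars.find t sub = 0 := by
  have hnn : 0 ≤ PySem.Chars.find t sub := (PySem.Chars.find_nonneg_iff t sub).mpr h.isInfix
  by_contra hne
  have hpos : 0 < (PySem.Chars.find t sub).toNat := by omega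
  exact (PySem.Chars.find_spec hnn).2 0 hpos (by simpa using h)

theorem spR_not (sep t : List Char) (h : ¬ (sep <:+: t ∧ sep ≠ [])) : spR sep t = [t] := by
  rw [spR, dif_neg h]

theorem spR_found (sep t : List Char) (hinf : sep <:+: t) (hsep : sep ≠ []) :
    spR sep t = (t.take (PySem.Chars.find t sep).toNat) ::
      spR sep (t.drop ((PySem.Chars.find t sep).toNat + sep.length)) := by
  rw [spR, dif_pos ⟨hinf, hsep⟩]

theorem spR_ne_nil (sep t : List Char) : spR sep t ≠ [] := by
  rw [spR]; split <;> simp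

theorem infix_cons_of_not_prefix {sep : List Char} {c : Char} {rest : List Char}
    (hinf : sep <:+: (c :: rest)) (hnp : ¬ sep <+: (c :: rest)) : sep <:+: rest := by
  obtain ⟨pre, suf, heq⟩ := hinf
  cases pre with
  | nil => exact absurd ⟨suf, by simpa using heq⟩ hnp
  | cons x xs =>
    refine ⟨xs, suf, ?_⟩
    have := heq
    simp only [List.cons_append, List.cons.injEq] at this
    exact this.2

theorem spR_cons (sep : List Char) (c : Char) (rest : List Char)
    (hnp : ¬ sep <+: (c :: rest)) (hsep : sep ≠ []) :
    spR sep (c :: rest) = (spR sep rest).modifyHead (fun h => c :: h) := by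
  by_cases hinf : sep <:+: (c :: rest)
  · have hinf' : sep <:+: rest := infix_cons_of_not_prefix hinf hnp
    have hr0 : 0 ≤ PySem.Chars.find rest sep := (PySem.Chars.find_nonneg_iff rest sep).mpr hinf'
    have hne : PySem.Chars.find rest sep ≠ -1 := by omega
    have hfind : PySem.Chars.find (c :: rest) sep = 1 + PySem.Chars.find rest sep := by
      have h1 : PySem.Chars.find (c :: rest) sep =
          if sep.isPrefixOf (c :: rest) = true then (0 : Int) else PySem.Chars.find.go sep rest 1 := rfl
      rw [h1, if_neg (by simpa [List.isPrefixOf_iff_prefix] using hnp), findGo_eq sep rest 1,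
        if_neg hne]
      norm_num
    rw [spR_found sep (c :: rest) hinf hsep, spR_found sep rest hinf' hsep, hfind]
    have htn : (1 + PySem.Chars.find rest sep).toNat = (PySem.Chars.find rest sep).toNat + 1 := by
      omega
    rw [htn]
    simp only [List.take_succ_cons, List.modifyHead_cons]
    have e : (PySem.Chars.find rest sep).toNat + 1 + sep.length =
        ((PySem.Chars.find rest sep).toNat + sep.length) + 1 := by omega
    rw [e, List.drop_succ_cons]
  · have hinf' : ¬ sep <:+: rest := fun h => hinf (h.trans (List.suffix_cons c rest).isInfix)
    rw [spR_not sep _ (by tauto), spR_not sep _ (by tauto)]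
    simp

theorem splitOn_go_eq (sep : List Char) (hsep : sep ≠ []) :
    ∀ (fuel : Nat) (l cur : List Char) (acc : List (List Char)), l.length < fuel →
      PySem.Chars.splitOn.go sep fuel l cur acc =
        acc.reverse ++ (spR sep l).modifyHead (fun h => cur.reverse ++ h) := by
  intro fuel
  induction fuel with
  | zero => intro l cur acc h; omega
  | succ fuel IH =>
    intro l cur acc hlen
    cases l with
    | nil =>
      have h1 : PySem.Chars.splitOn.go sep (fuel + 1) [] cur acc =
          (cur.reverse :: acc).reverse := rfl
      rw [h1, spR_not sep [] (by rintro ⟨hi, hne⟩; exact hne (List.eq_nil_of_infix_nil hi))]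
      simp
    | cons c rest =>
      have h1 : PySem.Chars.splitOn.go sep (fuel + 1) (c :: rest) cur acc =
          if sep.isPrefixOf (c :: rest) = true then
            PySem.Chars.splitOn.go sep fuel (List.drop sep.length (c :: rest)) []
              (cur.reverse :: acc)
          else PySem.Chars.splitOn.go sep fuel rest (c :: cur) acc := rfl
      rw [h1]
      cases hp : sep.isPrefixOf (c :: rest)
      · simp only [Bool.false_eq_true, if_false]
        rw [IH rest (c :: cur) acc (by simp at hlen ⊢; omega)]
        rw [spR_cons sep c rest (by rw [← List.isPrefixOf_iff_prefix]; simp [hp]) hsep]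
        rw [List.modifyHead_modifyHead]
        simp [Function.comp_def, List.append_assoc]
      · simp only [if_true]
        have hpre : sep <+: (c :: rest) := by rwa [← List.isPrefixOf_iff_prefix]
        have hlpos : 0 < sep.length := List.length_pos_iff.mpr hsep
        rw [IH (List.drop sep.length (c :: rest)) [] (cur.reverse :: acc)
          (by simp at hlen ⊢; omega)]
        rw [spR_found sep (c :: rest) hpre.isInfix hsep, find_eq_zero_of_prefix _ _ hpre]
        simp only [Int.toNat_zero, List.take_zero, Nat.zero_add, List.modifyHead_cons,
          List.reverse_cons, List.reverse_nil, List.nil_append, List.append_assoc,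
          List.cons_append]
        rw [show (fun h : List Char => h) = id from rfl, List.modifyHead_id]
        simp

theorem splitOn_eq_spR (t sep : List Char) (hsep : sep ≠ []) :
    PySem.Chars.splitOn t sep = spR sep t := by
  have h1 : PySem.Chars.splitOn t sep = PySem.Chars.splitOn.go sep (t.length + 1) t [] [] := rfl
  rw [h1, splitOn_go_eq sep hsep (t.length + 1) t [] [] (by omega)]
  simp only [List.reverse_nil, List.nil_append]
  rw [show (fun h : List Char => h) = id from rfl, List.modifyHead_id]
  simp

theorem go1R_nil (sep cur : List Char) (glue : Bool) : go1R sep cur glue [] = [cur] := rfl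

theorem go1R_cons (sep cur : List Char) (glue : Bool) (q : List Char) (rest2 : List (List Char)) :
    go1R sep cur glue (q :: rest2) =
      if glue || decide (q = ([] : List Char) ∧ rest2 ≠ []) then
        go1R sep (cur ++ sep ++ q) (decide (q = ([] : List Char) ∧ rest2 ≠ [])) rest2
      else cur :: go1R sep q (decide (q = ([] : List Char) ∧ rest2 ≠ [])) rest2 := rfl

theorem go1R_append (sep : List Char) : ∀ (rest : List (List Char)) (x y : List Char) (glue : Bool),
    go1R sep (x ++ y) glue rest = (go1R sep y glue rest).modifyHead (fun h => x ++ h) := by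
  intro rest
  induction rest with
  | nil => intro x y glue; simp [go1R_nil]
  | cons q rest2 IH =>
    intro x y glue
    rw [go1R_cons, go1R_cons]
    cases hc : glue || decide (q = ([] : List Char) ∧ rest2 ≠ [])
    · simp only [if_false, Bool.false_eq_true]
      simp [List.modifyHead_cons]
    · simp only [if_true]
      rw [show x ++ y ++ sep ++ q = x ++ (y ++ sep ++ q) by simp [List.append_assoc]]
      exact IH x (y ++ sep ++ q) _

theorem sepTimes_cons (sep : List Char) (n : Nat) : sepTimes sep (n + 1) = sep ++ sepTimes sep n := rfl

theorem sepTimes_snoc (sep : List Char) : ∀ n, sepTimes sep (n + 1) = sepTimes sep n ++ sep := by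
  intro n
  induction n with
  | zero => simp [sepTimes]
  | succ n IH =>
    rw [sepTimes_cons]
    conv_lhs => rw [IH]
    rw [sepTimes_cons]
    simp [List.append_assoc]

theorem go1R_run (sep : List Char) : ∀ (es : List (List Char)), (∀ e ∈ es, e = []) →
    ∀ (cur : List Char) (rest' : List (List Char)), rest' ≠ [] →
      go1R sep cur true (es ++ rest') = go1R sep (cur ++ sepTimes sep es.length) true rest' := by
  intro es
  induction es with
  | nil => intro _ cur rest' _; simp [sepTimes]
  | cons e es IH =>
    intro hall cur rest' hne
    have he : e = [] := hall e (by simp)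
    subst he
    rw [List.cons_append, go1R_cons]
    have hie : decide (([] : List Char) = ([] : List Char) ∧ es ++ rest' ≠ []) = true := by
      simp [hne]
    rw [hie]
    simp only [Bool.or_true, if_true]
    rw [List.append_nil]
    rw [IH (fun e he => hall e (by simp [he])) (cur ++ sep) rest' hne]
    congr 1
    simp only [List.length_cons, sepTimes_cons]
    simp [List.append_assoc]

theorem go1R_exit (sep : List Char) (q : List Char) (rest2 : List (List Char)) (cur : List Char)
    (h : q ≠ [] ∨ rest2 = []) :
    go1R sep cur true (q :: rest2) = (go1R sep q false rest2).modifyHead (fun hh => (cur ++ sep) ++ hh) := by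
  rw [go1R_cons]
  have hie : decide (q = ([] : List Char) ∧ rest2 ≠ []) = false := by
    rcases h with h | h <;> simp [h]
  rw [hie]
  simp only [Bool.or_false, if_true]
  rw [show cur ++ sep ++ q = (cur ++ sep) ++ q by simp [List.append_assoc]]
  exact go1R_append sep rest2 (cur ++ sep) q false

theorem join_empties (sep : List Char) : ∀ (es : List (List Char)), (∀ e ∈ es, e = []) →
    PySem.Chars.join sep ([] :: es) = sepTimes sep es.length := by
  intro es
  induction es with
  | nil => intro _; simp [PySem.Chars.join_singleton, sepTimes]
  | cons e es IH =>
    intro hall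
    have he : e = [] := hall e (by simp)
    subst he
    rw [PySem.Chars.join_cons_cons, IH (fun e he => hall e (by simp [he]))]
    simp only [List.length_cons, sepTimes_cons]
    simp

theorem gQR_singleton (sep p : List Char) : gQR sep [p] = [p] := by rw [gQR]

theorem dropWhile_head_false {α : Type} (p : α → Bool) :
    ∀ (l : List α) (x : α) (xs : List α), List.dropWhile p l = x :: xs → p x = false := by
  intro l
  induction l with
  | nil => intro x xs h; simp [List.dropWhile] at h
  | cons a t IH =>
    intro x xs h
    rw [List.dropWhile_cons] at h
    cases hp : p a
    · rw [hp] at h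
      simp only [Bool.false_eq_true, if_false, List.cons.injEq] at h
      rw [← h.1]; exact hp
    · rw [hp] at h
      simp only [if_true] at h
      exact IH x xs h

theorem gQR_cons_cons (sep : List Char) (p q : List Char) (rest2 : List (List Char)) :
    gQR sep (p :: q :: rest2) =
      if ((q :: rest2).dropLast).takeWhile (fun e => decide (e = [])) = [] then
        p :: gQR sep (q :: rest2)
      else
        (gQR sep ((q :: rest2).drop
            (((q :: rest2).dropLast).takeWhile (fun e => decide (e = []))).length)).modifyHead
          (fun h => p ++ sep ++
            PySem.Chars.join sep (((q :: rest2).dropLast).takeWhile (fun e => decide (e = []))) ++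
            sep ++ h) := by
  rw [gQR]

theorem go1R_eq_gQR (sep : List Char) :
    ∀ (n : Nat) (rest : List (List Char)) (cur : List Char), rest.length ≤ n →
      go1R sep cur false rest = gQR sep (cur :: rest) := by
  intro n
  induction n with
  | zero =>
    intro rest cur h
    have : rest = [] := List.eq_nil_of_length_eq_zero (by omega)
    subst this
    rw [go1R_nil, gQR_singleton]
  | succ n IH =>
    intro rest cur hlen
    cases rest with
    | nil => rw [go1R_nil, gQR_singleton]
    | cons q rest2 =>
      rw [go1R_cons, gQR_cons_cons]
      by_cases hie : q = ([] : List Char) ∧ rest2 ≠ []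
      · -- glue step: a run starts here
        obtain ⟨hq, hr2⟩ := hie
        subst hq
        have hdec : decide (([] : List Char) = ([] : List Char) ∧ rest2 ≠ []) = true := by
          simp [hr2]
        rw [hdec]
        simp only [Bool.or_true, if_true, List.append_nil]
        -- left side: consume the whole run of interior empties, then exit
        set es2 := (rest2.dropLast).takeWhile (fun e => decide (e = [])) with hes2
        set d := (rest2.dropLast).dropWhile (fun e => decide (e = [])) with hd
        have hsplit : rest2.dropLast = es2 ++ d := (List.takeWhile_append_dropWhile).symm
        have hrest2 : rest2 = es2 ++ (d ++ [rest2.getLast hr2]) := by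
          conv_lhs => rw [← List.dropLast_append_getLast hr2, hsplit]
          simp [List.append_assoc]
        have hrest' : rest2.drop es2.length = d ++ [rest2.getLast hr2] := by
          conv_lhs => rw [hrest2]
          exact List.drop_left
        have hall : ∀ e ∈ es2, e = [] := by
          intro e he
          have := List.mem_takeWhile_imp (hes2 ▸ he)
          simpa using this
        have hrne : d ++ [rest2.getLast hr2] ≠ [] := by simp
        have hstep1 : go1R sep (cur ++ sep) true rest2 =
            go1R sep ((cur ++ sep) ++ sepTimes sep es2.length) true (d ++ [rest2.getLast hr2]) := by
          conv_lhs => rw [hrest2]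
          exact go1R_run sep es2 hall (cur ++ sep) _ hrne
        -- the piece after the run is nonempty, or it is the final piece
        have hexit : ∀ (q' : List Char) (rs : List (List Char)),
            d ++ [rest2.getLast hr2] = q' :: rs → (q' ≠ [] ∨ rs = []) := by
          intro q' rs heq
          cases hdd : d with
          | nil => rw [hdd] at heq; simp at heq; right; exact heq.2.symm ▸ rfl
          | cons h0 hs =>
            left
            rw [hdd] at heq
            simp only [List.cons_append, List.cons.injEq] at heq
            have hdw : List.dropWhile (fun e => decide (e = ([] : List Char))) rest2.dropLast =
                h0 :: hs := by rw [← hd]; exact hdd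
            have hhead := dropWhile_head_false _ _ _ _ hdw
            simp only [decide_eq_false_iff_not] at hhead
            rw [← heq.1]
            exact hhead
        cases hrest'' : d ++ [rest2.getLast hr2] with
        | nil => exact absurd hrest'' hrne
        | cons q' rs =>
          have hq' := hexit q' rs hrest''
          rw [hrest''] at hstep1
          rw [hstep1, go1R_exit sep q' rs _ hq']
          have hlen2 : rs.length ≤ n := by
            have h1 : (q' :: rs).length = d.length + 1 := by rw [← hrest'']; simp
            have h2 : d.length ≤ rest2.dropLast.length := by
              rw [hsplit]; simp
            simp only [List.length_cons] at h1 hlen ⊢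
            simp only [List.length_dropLast] at h2
            omega
          rw [IH rs q' hlen2]
          -- now the right side
          have hesq : ((([] : List Char) :: rest2).dropLast).takeWhile (fun e => decide (e = [])) =
              ([] : List Char) :: es2 := by
            rw [List.dropLast_cons_of_ne_nil hr2]
            simp only [List.takeWhile_cons]
            simp [hes2]
          rw [hesq]
          rw [if_neg (by simp)]
          have hdrop : ((([] : List Char) :: rest2).drop ((([] : List Char) :: es2).length)) =
              q' :: rs := by
            simp only [List.length_cons, List.drop_succ_cons]
            rw [← hrest'', hrest']
          rw [hdrop, ← hrest'']
          rw [join_empties sep es2 hall]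
      · -- split step
        have hdec : decide (q = ([] : List Char) ∧ rest2 ≠ []) = false := by
          simpa using hie
        rw [hdec]
        simp only [Bool.or_false, if_false, Bool.false_eq_true]
        have hes : ((q :: rest2).dropLast).takeWhile (fun e => decide (e = [])) = [] := by
          cases hr2 : rest2 with
          | nil => simp
          | cons r rs =>
            have hq : q ≠ [] := by
              intro hq; exact hie ⟨hq, by simp [hr2]⟩
            rw [← hr2, List.dropLast_cons_of_ne_nil (by simp [hr2])]
            simp [hq]
        rw [hes, if_pos rfl]
        rw [IH rest2 q (by simp at hlen; omega)]

theorem sepTimes_length (sep : List Char) : ∀ m, (sepTimes sep m).length = m * sep.length := by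
  intro m
  induction m with
  | zero => simp [sepTimes]
  | succ m IH => rw [sepTimes_cons]; simp [IH]; ring

theorem takeWhile_replicate_nil (m : Nat) :
    List.takeWhile (fun e => decide (e = ([] : List Char))) (List.replicate m []) =
      List.replicate m [] := by
  induction m with
  | zero => simp
  | succ m IH => rw [List.replicate_succ, List.takeWhile_cons]; simp [IH]

theorem spR_run_decomp (sep : List Char) (hsep : sep ≠ []) : ∀ (u : List Char),
    ∃ (m : Nat) (v : List Char), runLenR sep u = m * sep.length ∧ u = sepTimes sep m ++ v ∧
      ¬ sep <+: v ∧ spR sep u = List.replicate m [] ++ spR sep v := by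
  intro u
  induction u using runLenR.induct (sep := sep) with
  | case1 x hx IH =>
    obtain ⟨m, v, h1, h2, h3, h4⟩ := IH
    refine ⟨m + 1, v, ?_, ?_, h3, ?_⟩
    · rw [runLenR_prefix sep x hx.1 hx.2, h1]; ring
    · rw [sepTimes_cons, List.append_assoc, ← h2]
      conv_lhs => rw [← List.take_append_drop sep.length x]
      congr 1
      exact ((List.prefix_iff_eq_take).mp hx.1).symm
    · rw [spR_found sep x hx.1.isInfix hx.2, find_eq_zero_of_prefix x sep hx.1]
      simp only [Int.toNat_zero, List.take_zero, Nat.zero_add, List.replicate_succ]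
      rw [h4]
      simp
  | case2 x hx =>
    have hnp : ¬ sep <+: x := by tauto
    exact ⟨0, x, by rw [runLenR_zero sep x hnp]; ring, by simp [sepTimes], hnp, by simp⟩

theorem spR_head (sep : List Char) (hsep : sep ≠ []) (v : List Char) (hnp : ¬ sep <+: v) :
    spR sep v = [v] ∨ (∃ v' tail', spR sep v = v' :: tail' ∧ v' ≠ []) := by
  by_cases hinf : sep <:+: v
  · right
    have hnn : 0 ≤ PySem.Chars.find v sep := (PySem.Chars.find_nonneg_iff v sep).mpr hinf
    have hne0 : (PySem.Chars.find v sep).toNat ≠ 0 := by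
      intro h0
      have hsp := (PySem.Chars.find_spec hnn).1
      rw [h0, List.drop_zero] at hsp
      exact hnp hsp
    have hvne : v ≠ [] := by
      intro hv
      subst hv
      exact hsep (List.eq_nil_of_infix_nil hinf)
    refine ⟨_, _, spR_found sep v hinf hsep, ?_⟩
    simp only [ne_eq, List.take_eq_nil_iff]
    tauto
  · left
    exact spR_not sep v (by tauto)

theorem gAR_neg (sep : List Char) : ∀ (n : Nat) (t : List Char) (m m' : Int),
    t.length ≤ n → m < 0 → m' < 0 → gAR sep t m = gAR sep t m' := by
  intro n
  induction n with
  | zero =>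
    intro t m m' hn hm hm'
    cases hf : fsingleR sep t with
    | none => rw [gAR_none sep t m hf, gAR_none sep t m' hf]
    | some i =>
      obtain ⟨h1, _, h3⟩ := fsingleR_some_facts sep t i hf
      have := List.length_pos_iff.mpr h1
      omega
  | succ n IH =>
    intro t m m' hn hm hm'
    cases hf : fsingleR sep t with
    | none => rw [gAR_none sep t m hf, gAR_none sep t m' hf]
    | some i =>
      obtain ⟨h1, _, h3⟩ := fsingleR_some_facts sep t i hf
      have hpos := List.length_pos_iff.mpr h1
      rw [gAR_some sep t m i hf, gAR_some sep t m' i hf,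
        if_neg (by omega), if_neg (by omega)]
      rw [IH (t.drop (i + sep.length)) (m - 1) (m' - 1) (by simp; omega) (by omega) (by omega)]

theorem takeWhile_spR_dropLast (sep : List Char) (hsep : sep ≠ []) (v : List Char)
    (hnp : ¬ sep <+: v) :
    ((spR sep v).dropLast).takeWhile (fun e => decide (e = [])) = [] := by
  rcases spR_head sep hsep v hnp with h | ⟨v', tail', heq, hne⟩
  · rw [h]; simp
  · rw [heq]
    cases tail' with
    | nil => simp
    | cons a tl =>
      rw [List.dropLast_cons_of_ne_nil (by simp)]
      rw [List.takeWhile_cons]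
      simp [hne]

theorem gQR_spR (sep : List Char) (hsep : sep ≠ []) : ∀ (n : Nat) (t : List Char),
    t.length ≤ n → gQR sep (spR sep t) = gAR sep t (-1) := by
  have hL : 0 < sep.length := List.length_pos_iff.mpr hsep
  intro n
  induction n with
  | zero =>
    intro t hn
    have ht : t = [] := by
      cases t with
      | nil => rfl
      | cons a l => simp at hn
    subst ht
    have hni : ¬ sep <:+: ([] : List Char) := fun h => hsep (List.eq_nil_of_infix_nil h)
    rw [spR_not sep [] (by tauto), gQR_singleton, gAR_none sep [] (-1) (fsingleR_none sep [] hni)]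
  | succ n IH =>
    intro t hn
    by_cases hinf : sep <:+: t
    · have hnn : 0 ≤ PySem.Chars.find t sep := (PySem.Chars.find_nonneg_iff t sep).mpr hinf
      set i := (PySem.Chars.find t sep).toNat with hi
      have hpre : sep <+: t.drop i := (PySem.Chars.find_spec hnn).1
      have hiL : i + sep.length ≤ t.length := by
        have h1 := hpre.length_le
        simp only [List.length_drop] at h1
        have h2 := PySem.Chars.find_le_length t sep
        omega
      have hsplit_t : t = t.take i ++ (sep ++ t.drop (i + sep.length)) := by
        conv_lhs => rw [← List.take_append_drop i t]
        congr 1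
        conv_lhs => rw [← List.take_append_drop sep.length (t.drop i)]
        rw [List.drop_drop]
        congr 1
        · exact ((List.prefix_iff_eq_take).mp hpre).symm
      set u := t.drop (i + sep.length) with hu
      set K := runLenR sep u with hK0
      have hfs : fsingleR sep t =
          (if K = 0 then some i
           else Option.map (fun j => i + sep.length + K + j)
             (fsingleR sep (t.drop (i + sep.length + K)))) := by
        rw [fsingleR, dif_pos ⟨hinf, hsep⟩]
      obtain ⟨m, v, hKm, huv, hnpv, hspu⟩ := spR_run_decomp sep hsep u
      rw [← hK0] at hKm
      have hspt : spR sep t = t.take i :: spR sep u := by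
        rw [spR_found sep t hinf hsep, ← hi, ← hu]
      cases m with
      | zero =>
        have hKz : K = 0 := by rw [hKm]; ring
        have huveq : u = v := by simpa [sepTimes] using huv
        have hfst : fsingleR sep t = some i := by rw [hfs, if_pos hKz]
        rw [gAR_some sep t (-1) i hfst, if_neg (by omega)]
        rw [hspt]
        cases hsp : spR sep u with
        | nil => exact absurd hsp (spR_ne_nil sep u)
        | cons q rest2 =>
          rw [gQR_cons_cons]
          have hes : ((q :: rest2).dropLast).takeWhile (fun e => decide (e = [])) = [] := by
            rw [← hsp, huveq]
            exact takeWhile_spR_dropLast sep hsep v hnpv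
          rw [hes, if_pos rfl, ← hsp, IH u (by simp only [hu, List.length_drop]; omega)]
          rw [← hu]
          rw [gAR_neg sep (n + 1) u (-1) (-1 - 1) (by simp only [hu, List.length_drop]; omega)
            (by omega) (by omega)]
      | succ m' =>
        have hKpos : K ≠ 0 := by
          rw [hKm]
          have : (m' + 1) * sep.length = m' * sep.length + sep.length := by ring
          omega
        have hfst : fsingleR sep t = Option.map (fun j => i + sep.length + K + j)
            (fsingleR sep (t.drop (i + sep.length + K))) := by rw [hfs, if_neg hKpos]
        have hveq : t.drop (i + sep.length + K) = v := by
          rw [← List.drop_drop (i := K) (j := i + sep.length), ← hu, huv]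
          have : K = (sepTimes sep (m' + 1)).length := by rw [sepTimes_length]; exact hKm
          rw [this]
          exact List.drop_left
        rw [hveq] at hfst
        -- left side: unfold gQR on the run
        rw [hspt, hspu, List.replicate_succ, List.cons_append, gQR_cons_cons]
        have hdl : ((List.replicate m' ([] : List Char) ++ spR sep v).dropLast) =
            List.replicate m' [] ++ (spR sep v).dropLast := by
          rw [List.dropLast_append]
          rw [if_neg (by simp [spR_ne_nil sep v])]
        have hes : ((List.replicate m' ([] : List Char) ++ spR sep v).dropLast).takeWhile
            (fun e => decide (e = [])) = List.replicate m' [] := by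
          rw [hdl, List.takeWhile_append, takeWhile_replicate_nil]
          rw [if_pos rfl, takeWhile_spR_dropLast sep hsep v hnpv]
          simp
        have hX : (List.replicate m' ([] : List Char) ++ spR sep v) ≠ [] := by
          simp [spR_ne_nil]
        have hes2 : ((([] : List Char) :: (List.replicate m' ([] : List Char) ++ spR sep v)).dropLast).takeWhile
            (fun e => decide (e = [])) = List.replicate (m' + 1) [] := by
          rw [List.dropLast_cons_of_ne_nil hX, List.takeWhile_cons]
          simp only [decide_eq_true_eq]
          rw [hes, List.replicate_succ]
          simp
        rw [hes2, if_neg (by simp)]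
        have hdrop : ((([] : List Char) :: (List.replicate m' ([] : List Char) ++ spR sep v)).drop
            (List.replicate (m' + 1) ([] : List Char)).length) = spR sep v := by
          simp only [List.length_replicate, List.drop_succ_cons]
          exact List.drop_left' (by simp)
        rw [hdrop]
        have hall' : ∀ e ∈ List.replicate m' ([] : List Char), e = ([] : List Char) := by
          intro e he; exact List.eq_of_mem_replicate he
        have hjoin : PySem.Chars.join sep (List.replicate (m' + 1) ([] : List Char)) =
            sepTimes sep m' := by
          rw [List.replicate_succ, join_empties sep _ hall', List.length_replicate]
        rw [hjoin]
        have hvlen : v.length ≤ n := by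
          rw [← hveq]
          simp only [List.length_drop]
          omega
        rw [IH v hvlen]
        cases hfv : fsingleR sep v with
        | none =>
          rw [gAR_none sep v (-1) hfv, gAR_none sep t (-1) (by rw [hfst, hfv]; rfl)]
          simp only [List.modifyHead_cons]
          conv_rhs => rw [hsplit_t, huv]
          simp [List.append_assoc, sepTimes_snoc]
        | some j =>
          have hfstj : fsingleR sep t = some (i + sep.length + K + j) := by
            rw [hfst, hfv]; rfl
          rw [gAR_some sep v (-1) j hfv, if_neg (by omega),
            gAR_some sep t (-1) _ hfstj, if_neg (by omega)]
          simp only [List.modifyHead_cons]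
          have hKlen : K = (sepTimes sep (m' + 1)).length := by
            rw [sepTimes_length]; exact hKm
          congr 1
          · -- heads agree
            have take_app3 : ∀ (A B : List Char) (N : Nat), A.length ≤ N →
                (A ++ B).take N = A ++ B.take (N - A.length) := by
              intro A B N h
              rw [List.take_append, List.take_of_length_le h]
            have hlen1 : (t.take i).length = i := by
              rw [List.length_take]; omega
            have hlenS : (sepTimes sep (m' + 1)).length = K := by
              rw [sepTimes_length]; exact hKm.symm
            have htake : t.take (i + sep.length + K + j) =
                t.take i ++ (sep ++ (sepTimes sep (m' + 1) ++ v.take j)) := by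
              conv_lhs => rw [hsplit_t, huv]
              rw [take_app3 _ _ _ (by omega : (t.take i).length ≤ i + sep.length + K + j)]
              congr 1
              rw [hlen1]
              rw [take_app3 _ _ _ (by omega : sep.length ≤ i + sep.length + K + j - i)]
              congr 1
              rw [take_app3 _ _ _ (by rw [hlenS]; omega :
                (sepTimes sep (m' + 1)).length ≤ i + sep.length + K + j - i - sep.length)]
              have e2 : i + sep.length + K + j - i - sep.length -
                  (sepTimes sep (m' + 1)).length = j := by rw [hlenS]; omega
              rw [e2]
            rw [htake, sepTimes_snoc]
            simp [List.append_assoc]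
          · -- tails agree
            congr 1
            rw [← hveq, List.drop_drop]
            congr 1
            omega
    · rw [spR_not sep t (by tauto), gQR_singleton,
        gAR_none sep t (-1) (fsingleR_none sep t hinf)]

theorem gAR_ne_nil (sep t : List Char) (m : Int) : gAR sep t m ≠ [] := by
  cases hf : fsingleR sep t with
  | none => rw [gAR_none sep t m hf]; simp
  | some i =>
    rw [gAR_some sep t m i hf]
    split <;> simp

theorem split_t_at (sep t : List Char) (i : Nat) (hpre : sep <+: t.drop i) (hil : i ≤ t.length) :
    t = t.take i ++ (sep ++ t.drop (i + sep.length)) := by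
  conv_lhs => rw [← List.take_append_drop i t]
  congr 1
  conv_lhs => rw [← List.take_append_drop sep.length (t.drop i)]
  rw [List.drop_drop]
  congr 1
  exact ((List.prefix_iff_eq_take).mp hpre).symm

theorem join_gAR (sep : List Char) (hsep : sep ≠ []) : ∀ (n : Nat) (t : List Char),
    t.length ≤ n → PySem.Chars.join sep (gAR sep t (-1)) = t := by
  have hL : 0 < sep.length := List.length_pos_iff.mpr hsep
  intro n
  induction n with
  | zero =>
    intro t hn
    have ht : t = [] := by cases t with | nil => rfl | cons a l => simp at hn
    subst ht
    rw [gAR_none sep [] (-1) (fsingleR_none sep []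
      (fun h => hsep (List.eq_nil_of_infix_nil h))), PySem.Chars.join_singleton]
  | succ n IH =>
    intro t hn
    cases hf : fsingleR sep t with
    | none => rw [gAR_none sep t (-1) hf, PySem.Chars.join_singleton]
    | some i =>
      obtain ⟨-, hpre, hil⟩ := fsingleR_some_facts sep t i hf
      rw [gAR_some sep t (-1) i hf, if_neg (by omega)]
      rw [gAR_neg sep (n + 1) (t.drop (i + sep.length)) (-1 - 1) (-1)
        (by simp; omega) (by omega) (by omega)]
      cases hl : gAR sep (t.drop (i + sep.length)) (-1) with
      | nil => exact absurd hl (gAR_ne_nil sep _ (-1))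
      | cons b l' =>
        rw [PySem.Chars.join_cons_cons, ← hl,
          IH (t.drop (i + sep.length)) (by simp; omega)]
        rw [List.append_assoc]
        exact (split_t_at sep t i hpre (by omega)).symm

theorem gAR_cap (sep : List Char) (hsep : sep ≠ []) : ∀ (n : Nat) (t : List Char) (m : Int),
    t.length ≤ n →
    gAR sep t m =
      (if m < 0 ∨ m ≥ ((gAR sep t (-1)).length : Int) - 1 then gAR sep t (-1)
       else (gAR sep t (-1)).take m.toNat ++
         [PySem.Chars.join sep ((gAR sep t (-1)).drop m.toNat)]) := by
  have hL : 0 < sep.length := List.length_pos_iff.mpr hsep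
  intro n
  induction n with
  | zero =>
    intro t m hn
    have ht : t = [] := by cases t with | nil => rfl | cons a l => simp at hn
    subst ht
    have hf : fsingleR sep [] = none :=
      fsingleR_none sep [] (fun h => hsep (List.eq_nil_of_infix_nil h))
    rw [gAR_none sep [] m hf, gAR_none sep [] (-1) hf]
    rw [if_pos (by simp; omega)]
  | succ n IH =>
    intro t m hn
    cases hf : fsingleR sep t with
    | none =>
      rw [gAR_none sep t m hf, gAR_none sep t (-1) hf]
      rw [if_pos (by simp; omega)]
    | some i =>
      obtain ⟨-, hpre, hil⟩ := fsingleR_some_facts sep t i hf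
      have hG : gAR sep t (-1) = t.take i :: gAR sep (t.drop (i + sep.length)) (-1) := by
        rw [gAR_some sep t (-1) i hf, if_neg (by omega),
          gAR_neg sep (n + 1) (t.drop (i + sep.length)) (-1 - 1) (-1)
            (by simp; omega) (by omega) (by omega)]
      set G' := gAR sep (t.drop (i + sep.length)) (-1) with hG'
      have hG'ne : G' ≠ [] := gAR_ne_nil sep _ (-1)
      have hG'len : 1 ≤ G'.length := by
        cases hGl : G' with
        | nil => exact absurd hGl hG'ne
        | cons a l => simp
      by_cases hmneg : m < 0
      · rw [gAR_neg sep (n + 1) t m (-1) hn hmneg (by omega), if_pos (Or.inl hmneg)]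
      by_cases hm0 : m = 0
      · subst hm0
        rw [gAR_some sep t 0 i hf, if_pos rfl]
        rw [if_neg (by rw [hG]; simp; omega)]
        simp only [Int.toNat_zero, List.take_zero, List.drop_zero, List.nil_append]
        rw [join_gAR sep hsep (n + 1) t hn]
      · -- m > 0
        rw [gAR_some sep t m i hf, if_neg hm0]
        rw [IH (t.drop (i + sep.length)) (m - 1) (by simp; omega), ← hG']
        rw [hG]
        have hlen : ((t.take i :: G').length : Int) - 1 = (G'.length : Int) - 1 + 1 := by
          simp
        by_cases hc : m - 1 < 0 ∨ m - 1 ≥ (G'.length : Int) - 1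
        · have hc' : m < 0 ∨ m ≥ ((t.take i :: G').length : Int) - 1 := by
            rcases hc with h | h
            · omega
            · right; rw [hlen]; omega
          rw [if_pos hc, if_pos hc']
        · have hc' : ¬ (m < 0 ∨ m ≥ ((t.take i :: G').length : Int) - 1) := by
            rw [hlen]; omega
          rw [if_neg hc, if_neg hc']
          have hmt : m.toNat = (m - 1).toNat + 1 := by omega
          rw [hmt, List.take_succ_cons, List.drop_succ_cons]
          simp

theorem dropLast_getLastD (gs : List (List Char)) (h : gs ≠ []) :
    gs.dropLast ++ [gs.getLastD []] = gs := by
  induction gs using List.reverseRecOn with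
  | nil => exact absurd rfl h
  | append_singleton ys y _ => rw [List.dropLast_concat, List.getLastD_concat]

theorem pyRange_empty (a b : Int) (h : b ≤ a) : PySem.List.pyRange a b = [] := by
  simp only [PySem.List.pyRange]
  rw [if_neg (by omega : ¬ (1 : Int) = 0)]
  rw [if_pos (by omega : (0:Int) < 1), if_neg (by omega : ¬ a < b)]
  simp

theorem foldl_bStep (sep : List Char) (pieces : List (List Char)) :
    ∀ (k : Nat) (i : Nat), pieces.length ≤ i + k → ∀ (gs : List (List Char)) (glue : Bool),
      gs ≠ [] →
      (List.foldl (bStep sep pieces) (gs, glue)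
        (PySem.List.pyRange (i : Int) (pieces.length : Int))).1 =
        gs.dropLast ++ go1R sep (gs.getLastD []) glue (pieces.drop i) := by
  intro k
  induction k with
  | zero =>
    intro i hik gs glue hgs
    rw [pyRange_empty _ _ (by omega), List.foldl_nil]
    rw [List.drop_eq_nil_of_le (by omega), go1R_nil]
    exact (dropLast_getLastD gs hgs).symm
  | succ k IH =>
    intro i hik gs glue hgs
    by_cases hi : i < pieces.length
    · rw [PySem.List.pyRange_one_cons (by omega : (i : Int) < (pieces.length : Int)),
        List.foldl_cons]
      have hp : PySem.List.pyGetD pieces (i : Int) [] = pieces[i] :=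
        PySem.List.pyGetD_eq_getElem pieces [] (by omega) (by exact_mod_cast hi)
      have hdropi : pieces.drop i = pieces[i] :: pieces.drop (i + 1) :=
        List.drop_eq_getElem_cons hi
      have hiff : (PySem.List.pyGetD pieces (i : Int) [] = [] ∧
          (i : Int) + 1 < (pieces.length : Int)) ↔
          (pieces[i] = [] ∧ pieces.drop (i + 1) ≠ []) := by
        rw [hp]
        constructor
        · rintro ⟨h1, h2⟩
          refine ⟨h1, ?_⟩
          rw [ne_eq, List.drop_eq_nil_iff]
          omega
        · rintro ⟨h1, h2⟩
          rw [ne_eq, List.drop_eq_nil_iff] at h2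
          exact ⟨h1, by omega⟩
      have hie : decide (PySem.List.pyGetD pieces (i : Int) [] = [] ∧
          (i : Int) + 1 < (pieces.length : Int)) =
          decide (pieces[i] = [] ∧ pieces.drop (i + 1) ≠ []) := by
        exact decide_eq_decide.mpr hiff
      have hie2 : decide (pieces[i] = [] ∧ (i : Int) + 1 < (pieces.length : Int)) =
          decide (pieces[i] = [] ∧ pieces.drop (i + 1) ≠ []) := by
        rw [← hie, hp]
      rw [hdropi, go1R_cons]
      have hstep : bStep sep pieces (gs, glue) (i : Int) =
          (if (glue || decide (pieces[i] = [] ∧ pieces.drop (i + 1) ≠ [])) = true then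
            csAppendLast gs (sep ++ pieces[i]) else gs ++ [pieces[i]],
           decide (pieces[i] = [] ∧ pieces.drop (i + 1) ≠ [])) := by
        unfold bStep
        simp only [hp, hie2]
      rw [hstep]
      have hc1 : ((i : Int) + 1) = ((i + 1 : Nat) : Int) := by push_cast; ring
      rw [hc1]
      cases hgl : (glue || decide (pieces[i] = [] ∧ pieces.drop (i + 1) ≠ [])) with
      | false =>
        simp only [Bool.false_eq_true, if_false]
        rw [IH (i + 1) (by omega) (gs ++ [pieces[i]]) _ (by simp)]
        rw [List.dropLast_concat, List.getLastD_concat]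
        rw [List.append_cons, dropLast_getLastD gs hgs]
      | true =>
        simp only [if_true]
        rw [IH (i + 1) (by omega) (csAppendLast gs (sep ++ pieces[i])) _ (by simp [csAppendLast])]
        unfold csAppendLast
        rw [List.dropLast_concat, List.getLastD_concat]
        rw [List.append_assoc]
    · rw [pyRange_empty _ _ (by exact_mod_cast by omega : (pieces.length : Int) ≤ (i : Int)),
        List.foldl_nil]
      rw [List.drop_eq_nil_of_le (by omega), go1R_nil]
      exact (dropLast_getLastD gs hgs).symm

theorem csAlt_eq (t sep : List Char) (hsep : sep ≠ []) (m : Int) :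
    csSplitSingleAlt t sep m = gAR sep t m := by
  have hsp : PySem.Chars.split? t sep = some (spR sep t) := by
    rw [PySem.Chars.split?]
    rw [if_neg (by simpa [List.isEmpty_iff] using hsep)]
    rw [splitOn_eq_spR t sep hsep]
  rw [csSplitSingleAlt, hsp]
  cases hspr : spR sep t with
  | nil => exact absurd hspr (spR_ne_nil sep t)
  | cons p0 rest =>
    simp only []
    have hfold : (List.foldl (bStep sep (p0 :: rest)) ([p0], false)
        (PySem.List.pyRange 1 ((p0 :: rest).length : Int))).1 = gAR sep t (-1) := by
      have h1 : ((1 : Nat) : Int) = (1 : Int) := rfl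
      have := foldl_bStep sep (p0 :: rest) (p0 :: rest).length 1 (by simp) [p0] false (by simp)
      rw [h1] at this
      rw [this]
      have e1 : ([p0] : List (List Char)).dropLast = [] := rfl
      have e2 : ([p0] : List (List Char)).getLastD [] = p0 := rfl
      simp only [e1, e2, List.drop_succ_cons, List.drop_zero, List.nil_append]
      rw [go1R_eq_gQR sep rest.length rest p0 (by omega), ← hspr,
        gQR_spR sep hsep t.length t (by omega)]
    rw [hfold]
    rw [gAR_cap sep hsep t.length t m (by omega)]
    by_cases hc : m < 0 ∨ m ≥ ((gAR sep t (-1)).length : Int) - 1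
    · rw [if_pos hc, if_pos hc]
    · rw [if_neg hc, if_neg hc]
      have hm0 : 0 ≤ m := by omega
      rw [PySem.List.slice_to _ hm0, PySem.List.slice_from _ hm0]

-- ===== VERDICT (by name: the statement is the Claim_ definition above) =====
theorem splitSingle_spec : Claim_equal_splitSingle := by
  intro s separator maxCount _hdom hpre
  have hsep : separator.toList ≠ [] := fun h => hpre (String.toList_eq_nil_iff.mp h)
  show splitSingle s separator maxCount = splitSingle_alt s separator maxCount
  unfold splitSingle splitSingle_alt
  rw [csSplitSingle_eq s.toList separator.toList hsep maxCount,
    csAlt_eq s.toList separator.toList hsep maxCount]
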